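-- pv_equiv track=rewrite | github.com/ArthurVerrez/project-euler | PE85.py | tab_val
-- ===== SOURCE A (Python) =====
-- def rect_in_rect(a,b,c,d):
--     #En largeur
--     larg=a-c+1
--     #En longueur
--     long=b-d+1
--     return larg*long
--
-- def num_rect(a,b):
--     r=0
--     for c in range(1,a+1):
--         for d in range(1,b+1):
--             r+=rect_in_rect(a,b,c,d)
--     return r
--
-- def tab_val(n):
--     l=n*[0]
--     for i in range(n):
--         l[i]=n*[0]
--     for i in range(n):
--         for j in range(n):
--             l[i][j]=num_rect(i,j)
--     return l
-- ===== SOURCE B (Python) =====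
-- def tab_val(n):
--     t = [k * (k + 1) // 2 for k in range(n)]
--     return [[ti * tj for tj in t] for ti in t]
-- ===== Notes on version B (the rewrite author's own statement) =====
-- stated objective: faster
-- what changed: B computes each cell as the product of the triangular numbers of its row and column indices, precomputed once per index, instead of A's per-cell double loop num_rect summing rectangle counts.
import Mathlib
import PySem

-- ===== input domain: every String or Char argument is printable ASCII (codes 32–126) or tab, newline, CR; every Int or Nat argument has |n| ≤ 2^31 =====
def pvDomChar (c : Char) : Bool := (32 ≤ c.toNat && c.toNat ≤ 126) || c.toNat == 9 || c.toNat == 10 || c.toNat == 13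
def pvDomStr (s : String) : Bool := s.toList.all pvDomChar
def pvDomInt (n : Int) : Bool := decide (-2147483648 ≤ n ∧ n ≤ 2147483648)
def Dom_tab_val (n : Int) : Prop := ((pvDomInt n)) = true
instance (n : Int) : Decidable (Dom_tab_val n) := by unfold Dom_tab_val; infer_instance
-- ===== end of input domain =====

-- B replaces A's per-cell nested summation num_rect(i,j) by the closed form tri(i)*tri(j) with tri(k)=k(k+1)//2; return values are identical.

-- ===== PORT A =====
def rect_in_rect (a b c d : Int) : Int :=
  let larg := a - c + 1
  let long := b - d + 1
  larg * long

def num_rect (a b : Int) : Int :=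
  (PySem.List.pyRange 1 (a+1) 1).foldl (fun r c =>
    (PySem.List.pyRange 1 (b+1) 1).foldl (fun r d =>
      r + rect_in_rect a b c d) r) 0

def tab_val (n : Int) : List (List Int) :=
  -- Python's l starts as n*[0] (a list of ints) and the first loop immediately replaces
  -- every entry with a fresh row n*[0]; the int placeholders never survive that loop, so
  -- the first loop is transcribed as building the list of rows (typed List (List Int)).
  let l : List (List Int) :=
    (PySem.List.pyRange 0 n 1).foldl (fun l _ => l ++ [PySem.List.pyRepeat [(0:Int)] n]) []
  (PySem.List.pyRange 0 n 1).foldl (fun l i =>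
    (PySem.List.pyRange 0 n 1).foldl (fun l j =>
      PySem.List.pySetD l i (PySem.List.pySetD (PySem.List.pyGetD l i []) j (num_rect i j))) l) l

-- ===== PORT B =====
def pvTri (k : Int) : Int := PySem.Int.floordiv (k * (k + 1)) 2

def tab_val_alt (n : Int) : List (List Int) :=
  let t := (PySem.List.pyRange 0 n 1).map pvTri
  t.map (fun ti => t.map (fun tj => ti * tj))

-- ===== PRECONDITION & SPEC =====
def Spec_tab_val (n : Int) (out : List (List Int)) : Prop := out = tab_val_alt n
instance (n : Int) (out : List (List Int)) : Decidable (Spec_tab_val n out) := by unfold Spec_tab_val; infer_instance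

-- ===== CLAIM (what is proved, stated in full; the proofs are below) =====
def Claim_equal_tab_val : Prop := ∀ (n : Int), Dom_tab_val n → Spec_tab_val n (tab_val n)

-- ===== LEMMAS AND PROOFS =====

theorem pv_gauss_aux (k : Nat) (c : Int) :
    2 * ((List.range k).map (fun x : Nat => c - x)).sum = k * (2*c - k + 1) := by
  induction k with
  | zero => simp
  | succ k ih =>
    rw [List.range_succ, List.map_append, List.sum_append]
    push_cast
    push_cast at ih
    simp only [List.map_singleton, List.sum_singleton]
    nlinarith [ih]

-- Gauss sum: Σ_{x<m} (m - x) = m(m+1)//2 (as Int floordiv).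
theorem pv_gauss (m : Nat) :
    ((List.range m).map (fun x : Nat => (m : Int) - x)).sum = pvTri (m : Int) := by
  have h := pv_gauss_aux m (m : Int)
  unfold pvTri
  rw [PySem.Int.floordiv_eq_ediv_of_pos (by norm_num)]
  have h2 : (m:Int) * (2*(m:Int) - m + 1) = m*(m+1) := by ring
  rw [h2] at h; omega

-- sum over range(1, k+1) of (k - d + 1) equals tri k, for 0 ≤ k
theorem pv_line_sum (k : Int) (hk : 0 ≤ k) :
    ((PySem.List.pyRange 1 (k+1) 1).map (fun d => k - d + 1)).sum = pvTri k := by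
  rw [PySem.List.pyRange_one]
  have h1 : (k + 1 - 1).toNat = k.toNat := by omega
  rw [h1, List.map_map]
  have h2 : ((fun d => k - d + 1) ∘ fun x : Nat => 1 + (x:Int)) = fun x : Nat => (k.toNat : Int) - x := by
    funext x; simp; omega
  rw [h2, pv_gauss]
  congr 1; omega

theorem pv_num_rect (a b : Int) (ha : 0 ≤ a) (hb : 0 ≤ b) :
    num_rect a b = pvTri a * pvTri b := by
  unfold num_rect
  have hinner : (fun (r c : Int) =>
      (PySem.List.pyRange 1 (b+1) 1).foldl (fun r d => r + rect_in_rect a b c d) r)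
      = fun (r c : Int) => r + (a - c + 1) * pvTri b := by
    funext r c
    rw [PySem.List.foldl_add (g := fun d => rect_in_rect a b c d)]
    have : (PySem.List.pyRange 1 (b+1) 1).map (fun d => rect_in_rect a b c d)
        = (PySem.List.pyRange 1 (b+1) 1).map (fun d => (a - c + 1) * (b - d + 1)) := rfl
    rw [this, List.sum_map_mul_left, ← pv_line_sum b hb]
  rw [hinner, PySem.List.foldl_add (g := fun c => (a - c + 1) * pvTri b)]
  have : (PySem.List.pyRange 1 (a+1) 1).map (fun c => (a - c + 1) * pvTri b)
      = (PySem.List.pyRange 1 (a+1) 1).map (fun c => pvTri b * (a - c + 1)) := by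
    simp [mul_comm]
  rw [this, List.sum_map_mul_left, ← pv_line_sum a ha]
  ring_nf

-- generic fill loop: setting positions 0..k-1 of a list of length ≥ k
theorem pv_setmap {α : Type} (d : α) (F : Nat → α → α) :
    ∀ (k : Nat) (l : List α), k ≤ l.length →
      (List.range k).foldl (fun l i => l.set i (F i (l.getD i d))) l
        = (List.range k).map (fun i => F i (l.getD i d)) ++ l.drop k := by
  intro k
  induction k with
  | zero => intro l _; simp
  | succ k ih =>
    intro l hk
    have hklt : k < l.length := by omega
    rw [List.range_succ, List.foldl_append, List.map_append, ih l (by omega)]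
    simp only [List.foldl_cons, List.foldl_nil]
    have hlen : ((List.range k).map (fun i => F i (l.getD i d))).length = k := by simp
    have hdrop : l.drop k = l[k] :: l.drop (k+1) := List.drop_eq_getElem_cons hklt
    rw [hdrop]
    have hgetD : ((List.range k).map (fun i => F i (l.getD i d)) ++ l[k] :: l.drop (k+1)).getD k d = l.getD k d := by
      rw [List.getD_eq_getElem?_getD, List.getElem?_append_right (by omega), hlen]
      simp [List.getD_eq_getElem?_getD, List.getElem?_eq_getElem hklt]
    rw [hgetD, List.set_append_right _ _ (by omega), hlen]
    simp only [Nat.sub_self, List.set_cons_zero]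
    simp [List.getD_eq_getElem?_getD, List.getElem?_eq_getElem hklt]

-- the inner j-loop only rewrites row i
theorem pv_inner (f : Nat → Int) (i : Nat) :
    ∀ (js : List Nat) (l : List (List Int)),
      js.foldl (fun l j => l.set i ((l.getD i []).set j (f j))) l
        = l.set i (js.foldl (fun r j => r.set j (f j)) (l.getD i [])) := by
  intro js
  induction js with
  | nil =>
    intro l
    by_cases hi : i < l.length
    · simp [List.getD_eq_getElem?_getD, List.getElem?_eq_getElem hi]
    · rw [List.set_eq_of_length_le (le_of_not_gt hi)]; rfl
  | cons j js ih =>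
    intro l
    rw [List.foldl_cons, ih, List.foldl_cons]
    by_cases hi : i < l.length
    · have h1 : (l.set i ((l.getD i []).set j (f j))).getD i [] = (l.getD i []).set j (f j) := by
        rw [List.getD_eq_getElem?_getD, List.getElem?_set_self hi]
        rfl
      rw [h1, List.set_set]
    · have hlen : l.length ≤ i := le_of_not_gt hi
      have h0 : l.getD i [] = [] := by
        rw [List.getD_eq_getElem?_getD, List.getElem?_eq_none hlen]
        rfl
      have hset : ∀ r : List Int, l.set i r = l := fun r => List.set_eq_of_length_le hlen
      simp only [h0, List.set_nil, hset]

def pv_rowfill (n : Int) (i : Nat) (r : List Int) : List Int :=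
  (List.range n.toNat).foldl (fun r j => r.set j (num_rect (i : Int) (j : Int))) r

theorem pv_A_char (n : Int) :
    tab_val n = (List.range n.toNat).map (fun i : Nat =>
      (List.range n.toNat).map (fun j : Nat => num_rect (i : Int) (j : Int))) := by
  unfold tab_val
  rw [PySem.List.pyRange_one]
  rw [PySem.List.foldl_append_singleton_eq_map]
  simp only [List.nil_append, sub_zero, List.foldl_map, zero_add,
    PySem.List.pySetD_natCast, PySem.List.pyGetD_natCast, PySem.List.pyRepeat_singleton,
    List.map_map, Function.comp_def, List.map_const']
  rw [List.length_range]
  have houter : (fun (x : List (List Int)) (y : Nat) =>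
      List.foldl (fun x j => x.set y ((x.getD y []).set j (num_rect ↑y ↑j))) x (List.range n.toNat))
      = fun l i => l.set i (pv_rowfill n i (l.getD i ([] : List Int))) := by
    funext l i
    exact pv_inner _ i _ l
  rw [houter, pv_setmap ([] : List Int) (pv_rowfill n) n.toNat _ (by simp)]
  have hrow : ∀ i : Nat, pv_rowfill n i (List.replicate n.toNat 0) = (List.range n.toNat).map (fun j : Nat => num_rect (i : Int) (j : Int)) := by
    intro i
    have h := pv_setmap (0:Int) (fun j _ => num_rect (i:Int) (j:Int)) n.toNat (List.replicate n.toNat 0) (by simp)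
    simpa [pv_rowfill] using h
  simp only [List.drop_replicate, Nat.sub_self, List.replicate_zero, List.append_nil]
  refine List.map_congr_left (fun a hmem => ?_)
  have ha : a < n.toNat := List.mem_range.mp hmem
  simp [ha, hrow]

theorem pv_B_char (n : Int) :
    tab_val_alt n = (List.range n.toNat).map (fun i : Nat =>
      (List.range n.toNat).map (fun j : Nat => pvTri (i : Int) * pvTri (j : Int))) := by
  unfold tab_val_alt
  rw [PySem.List.pyRange_one]
  simp [List.map_map, Function.comp_def]

-- ===== VERDICT (by name: the statement is the Claim_ definition above) =====
theorem tab_val_spec : Claim_equal_tab_val := by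
  intro n _
  unfold Spec_tab_val
  rw [pv_A_char, pv_B_char]
  refine List.map_congr_left (fun i _ => List.map_congr_left (fun j _ => ?_))
  exact pv_num_rect _ _ (Int.natCast_nonneg i) (Int.natCast_nonneg j)
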